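-- pv_equiv track=rewrite | github.com/tinmar112/backend | pegs.py | pegs
-- ===== SOURCE A (Python) =====
-- def pegs(ref: list[str], test: list[str]) -> str:
--     """Implements the matching algorithm which returns pegs for the Mastermind game."""
--     assert len(ref) == len(test)
--
--     n = len(ref)
--     result = ['empty'] * n
--     already_counted_ref = []
--     already_counted_test = []
--
--     # First, assign 'red' pegs (correct color and position)
--     for i in range(n):
--         if ref[i] == test[i]:
--             result[i] = 'red'
--             already_counted_ref.append(i)
--             already_counted_test.append(i)
--
--     # Then assign 'white' pegs (correct color, wrong position)
--     for j in range(n):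
--         if result[j] == 'empty':  # skip already matched positions
--             for i in range(n):
--                 if (
--                     ref[i] == test[j]
--                     and i not in already_counted_ref
--                     and j not in already_counted_test
--                 ):
--                     result[j] = 'white'
--                     already_counted_ref.append(i)
--                     already_counted_test.append(j)
--                     break  # only one match per test[j]
--
--     return ' '.join(result)
-- ===== SOURCE B (Python) =====
-- def pegs(ref: list[str], test: list[str]) -> str:
--     """Mastermind pegs: one O(n) pass with a color-count dict instead of the nested scans."""
--     assert len(ref) == len(test)
--
--     counts = {}
--     for r, t in zip(ref, test):
--         if r != t:
--             counts[r] = counts.get(r, 0) + 1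
--
--     out = []
--     for r, t in zip(ref, test):
--         if r == t:
--             out.append('red')
--         elif counts.get(t, 0) > 0:
--             counts[t] -= 1
--             out.append('white')
--         else:
--             out.append('empty')
--     return ' '.join(out)
-- ===== Notes on version B (the rewrite author's own statement) =====
-- stated objective: faster
-- what changed: Replaces the quadratic inner scan over ref with already-counted index lists by a single dict of available non-red color counts, consumed per test position in one pass.
import Mathlib
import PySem

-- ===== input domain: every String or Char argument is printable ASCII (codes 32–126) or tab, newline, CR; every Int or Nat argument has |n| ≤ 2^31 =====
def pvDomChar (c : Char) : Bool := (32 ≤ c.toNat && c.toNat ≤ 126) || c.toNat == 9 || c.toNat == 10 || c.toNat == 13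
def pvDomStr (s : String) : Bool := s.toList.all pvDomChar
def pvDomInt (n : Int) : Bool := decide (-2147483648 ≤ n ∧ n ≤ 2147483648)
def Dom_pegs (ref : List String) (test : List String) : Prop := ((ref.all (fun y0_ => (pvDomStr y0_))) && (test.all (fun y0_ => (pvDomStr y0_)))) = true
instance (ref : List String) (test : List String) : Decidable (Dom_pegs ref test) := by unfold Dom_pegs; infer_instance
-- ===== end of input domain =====

-- B replaces A's quadratic nested inner scan by a dict of available non-red color counts consumed in one pass.

-- ===== PORT A =====
-- inner 'for i in range(n): … break' of A's white phase: first i with ref[i] == test[j]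
-- and i, j not already counted; state s = (result, already_counted_ref, already_counted_test)
def pegsInner (ref : List String) (test : List String) (j : Nat) :
    List Nat → List String × List Nat × List Nat → List String × List Nat × List Nat
  | [], s => s
  | i :: is, s =>
    if ref.getD i "" = test.getD j "" ∧ i ∉ s.2.1 ∧ j ∉ s.2.2 then
      (s.1.set j "white", s.2.1 ++ [i], s.2.2 ++ [j])
    else pegsInner ref test j is s

def pegs (ref : List String) (test : List String) : String :=
  if ref.length = test.length then   -- 'assert len(ref) == len(test)': outside this the Python raises
    let n := ref.length
    -- red phase
    let s1 := (List.range n).foldl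
      (fun (s : List String × List Nat × List Nat) i =>
        if ref.getD i "" = test.getD i "" then (s.1.set i "red", s.2.1 ++ [i], s.2.2 ++ [i]) else s)
      (List.replicate n "empty", ([] : List Nat), ([] : List Nat))
    -- white phase
    let s2 := (List.range n).foldl
      (fun (s : List String × List Nat × List Nat) j =>
        if s.1.getD j "" = "empty" then pegsInner ref test j (List.range n) s else s) s1
    PySem.Str.join " " s2.1
  else ""

-- ===== PORT B =====
def pegs_alt (ref : List String) (test : List String) : String :=
  if ref.length = test.length then   -- same assert
    let counts := (ref.zip test).foldl
      (fun (d : PySem.Dict String Int) p =>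
        if p.1 ≠ p.2 then d.insert p.1 (d.getD p.1 0 + 1) else d) PySem.Dict.empty
    let s := (ref.zip test).foldl
      (fun (s : PySem.Dict String Int × List String) p =>
        if p.1 = p.2 then (s.1, s.2 ++ ["red"])
        else if s.1.getD p.2 0 > 0 then (s.1.insert p.2 (s.1.getD p.2 0 - 1), s.2 ++ ["white"])
        else (s.1, s.2 ++ ["empty"])) (counts, ([] : List String))
    PySem.Str.join " " s.2
  else ""

-- ===== PRECONDITION & SPEC =====
-- Pre_: A (and B) assert len(ref) == len(test) and raise AssertionError otherwise.
def Pre_pegs (ref : List String) (test : List String) : Prop := ref.length = test.length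
instance (ref : List String) (test : List String) : Decidable (Pre_pegs ref test) := by unfold Pre_pegs; infer_instance
def pvWitness_pegs : List String × List String := (["a", "b", "c"], ["b", "b", "a"])

def Spec_pegs (ref : List String) (test : List String) (out : String) : Prop := out = pegs_alt ref test
instance (ref : List String) (test : List String) (out : String) : Decidable (Spec_pegs ref test out) := by unfold Spec_pegs; infer_instance

-- ===== CLAIM (what is proved, stated in full; the proofs are below) =====
def Claim_equal_pegs : Prop := ∀ (ref : List String) (test : List String), Dom_pegs ref test → Pre_pegs ref test → Spec_pegs ref test (pegs ref test)

-- ===== LEMMAS AND PROOFS =====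

-- proof-side abbreviations
def pvRed (ref test : List String) (i : Nat) : Bool := ref.getD i "" == test.getD i ""

-- result of A's red phase / the two counted-index lists after it
def pvRes0 (ref test : List String) : List String :=
  (List.range ref.length).map (fun i => if pvRed ref test i then "red" else "empty")
def pvR (ref test : List String) : List Nat := (List.range ref.length).filter (pvRed ref test)

-- number of still-available (not yet counted) ref positions of color c
def pvAvail (ref : List String) (acr : List Nat) (c : String) : Nat :=
  ((List.range ref.length).filter (fun i => !(List.elem i acr) && (ref.getD i "" == c))).length

-- A's white-phase step and state after k steps
def pvStA (ref test : List String) (s : List String × List Nat × List Nat) (j : Nat) :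
    List String × List Nat × List Nat :=
  if s.1.getD j "" = "empty" then pegsInner ref test j (List.range ref.length) s else s
def pvA (ref test : List String) (k : Nat) : List String × List Nat × List Nat :=
  (List.range k).foldl (pvStA ref test) (pvRes0 ref test, pvR ref test, pvR ref test)

-- B's counts dict (indexed over positions) and B's state after k steps
def pvC0 (ref test : List String) : PySem.Dict String Int :=
  (List.range ref.length).foldl
    (fun d j => if ref.getD j "" ≠ test.getD j "" then
        d.insert (ref.getD j "") (d.getD (ref.getD j "") 0 + 1) else d) PySem.Dict.empty
def pvStB (s : PySem.Dict String Int × List String) (p : String × String) :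
    PySem.Dict String Int × List String :=
  if p.1 = p.2 then (s.1, s.2 ++ ["red"])
  else if s.1.getD p.2 0 > 0 then (s.1.insert p.2 (s.1.getD p.2 0 - 1), s.2 ++ ["white"])
  else (s.1, s.2 ++ ["empty"])
def pvB (ref test : List String) (k : Nat) : PySem.Dict String Int × List String :=
  (List.range k).foldl (fun s j => pvStB s (ref.getD j "", test.getD j "")) (pvC0 ref test, ([] : List String))

-- generic list facts ---------------------------------------------------------
lemma pv_getD_set_self (l : List String) (k : Nat) (x d : String) (h : k < l.length) :
    (l.set k x).getD k d = x := by simp [List.getD, h]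

lemma pv_getD_set_ne (l : List String) (k m : Nat) (x d : String) (h : m ≠ k) :
    (l.set k x).getD m d = l.getD m d := by
  simp [List.getD, List.getElem?_set_ne (by omega : k ≠ m)]

lemma pv_getD_append_left (l1 l2 : List String) (m : Nat) (d : String) (h : m < l1.length) :
    (l1 ++ l2).getD m d = l1.getD m d := by simp [List.getD, List.getElem?_append_left h]

lemma pv_getD_append_len (l : List String) (x d : String) : (l ++ [x]).getD l.length d = x := by
  simp [List.getD]

lemma pv_getD_append_at (l : List String) (x d : String) (k : Nat) (h : l.length = k) :
    (l ++ [x]).getD k d = x := by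
  subst h
  exact pv_getD_append_len l x d

lemma pv_zip_eq_map_range (ref test : List String) (h : ref.length = test.length) :
    ref.zip test = (List.range ref.length).map (fun j => (ref.getD j "", test.getD j "")) := by
  apply List.ext_getElem
  · simp [h]
  · intro i h1 h2
    simp at h2
    simp [List.getElem_zip, List.getD, h2, h ▸ h2]

lemma pv_set_map_range (n k : Nat) (f : Nat → String) (v : String) :
    ((List.range n).map f).set k v = (List.range n).map (fun i => if i = k then v else f i) := by
  apply List.ext_getElem
  · simp
  · intro i h1 h2
    simp at h1
    rw [List.getElem_set]
    simp only [List.getElem_map, List.getElem_range]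
    split <;> rename_i hik
    · simp [hik.symm]
    · rw [if_neg (fun h : i = k => hik h.symm)]

lemma pv_length_filter_excl (p : Nat → Bool) (i0 : Nat) : ∀ (l : List Nat), l.Nodup → i0 ∈ l → p i0 = true →
    (l.filter (fun i => p i && !(i == i0))).length + 1 = (l.filter p).length := by
  intro l
  induction l with
  | nil => simp
  | cons x l ih =>
    intro hnd hmem hp
    rcases List.mem_cons.mp hmem with rfl | hmem'
    · have hnin : i0 ∉ l := (List.nodup_cons.mp hnd).1
      have heq : l.filter (fun i => p i && !(i == i0)) = l.filter p := by
        apply List.filter_congr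
        intro y hy
        have : y ≠ i0 := fun h => hnin (h ▸ hy)
        simp [this]
      simp [hp, heq]
    · have hne : x ≠ i0 := fun h => ((List.nodup_cons.mp hnd).1 (h ▸ hmem'))
      have := ih (List.nodup_cons.mp hnd).2 hmem' hp
      by_cases hpa : p x = true <;> simp [hpa, hne] <;> omega

-- the inner loop scans for the first admissible i and updates once ----------
lemma pegsInner_spec (ref test : List String) (j : Nat) :
    ∀ (l : List Nat) (res : List String) (acr act : List Nat),
    pegsInner ref test j l (res, acr, act) =
      match l.find? (fun i => decide (ref.getD i "" = test.getD j "" ∧ i ∉ acr ∧ j ∉ act)) with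
      | none => (res, acr, act)
      | some i0 => (res.set j "white", acr ++ [i0], act ++ [j]) := by
  intro l
  induction l with
  | nil => intro res acr act; simp [pegsInner]
  | cons i is ih =>
    intro res acr act
    simp only [pegsInner, List.find?_cons]
    by_cases h : ref.getD i "" = test.getD j "" ∧ i ∉ acr ∧ j ∉ act
    · rw [if_pos h, decide_eq_true h]
    · rw [if_neg h, decide_eq_false h]
      simpa using ih res acr act

-- red phase: result is 'red'/'empty' pointwise, counted lists are the red indices
lemma pv_phase1 (ref test : List String) : ∀ (k : Nat), k ≤ ref.length →
    (List.range k).foldl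
      (fun (s : List String × List Nat × List Nat) i =>
        if ref.getD i "" = test.getD i "" then (s.1.set i "red", s.2.1 ++ [i], s.2.2 ++ [i]) else s)
      (List.replicate ref.length "empty", ([] : List Nat), ([] : List Nat))
    = ((List.range ref.length).map (fun i => if i < k ∧ pvRed ref test i then "red" else "empty"),
       (List.range k).filter (pvRed ref test), (List.range k).filter (pvRed ref test)) := by
  intro k
  induction k with
  | zero => intro _; simp [List.map_const']
  | succ k ih =>
    intro hk
    rw [List.range_succ, List.foldl_append, ih (by omega), List.filter_append]
    by_cases hred : pvRed ref test k
    · have heq : ref.getD k "" = test.getD k "" := by simpa [pvRed] using hred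
      simp only [List.foldl_cons, List.foldl_nil, if_pos heq]
      rw [pv_set_map_range]
      refine Prod.ext ?_ (Prod.ext ?_ ?_) <;> simp [hred]
      intro a _
      by_cases hak : a = k
      · simp [hak, hred]
      · rw [if_neg hak]
        have h2 : a ≤ k ↔ a < k := by omega
        simp only [h2]
    · have heq : ¬ (ref.getD k "" = test.getD k "") := by simpa [pvRed] using hred
      simp only [List.foldl_cons, List.foldl_nil, if_neg heq]
      refine Prod.ext ?_ (Prod.ext ?_ ?_) <;> simp [hred]
      intro a _
      by_cases hak : a = k
      · simp [hak, hred]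
      · have h2 : a ≤ k ↔ a < k := by omega
        simp only [h2]

lemma pv_phase1_final (ref test : List String) :
    (List.range ref.length).foldl
      (fun (s : List String × List Nat × List Nat) i =>
        if ref.getD i "" = test.getD i "" then (s.1.set i "red", s.2.1 ++ [i], s.2.2 ++ [i]) else s)
      (List.replicate ref.length "empty", ([] : List Nat), ([] : List Nat))
    = (pvRes0 ref test, pvR ref test, pvR ref test) := by
  rw [pv_phase1 ref test ref.length (le_refl _)]
  unfold pvRes0 pvR
  congr 1
  apply List.map_congr_left
  intro i hi
  simp at hi
  simp [hi]

-- counting loop keyed by a function (specialisation of the dict-counter pattern)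
lemma pv_getD_foldl_insert_key (key : Nat → String) (c : String) :
    ∀ (l : List Nat) (d : PySem.Dict String Int),
    (l.foldl (fun d j => d.insert (key j) (d.getD (key j) 0 + 1)) d).getD c 0
      = d.getD c 0 + l.countP (fun j => key j == c) := by
  intro l
  induction l with
  | nil => simp
  | cons j l ih =>
    intro d
    rw [List.foldl_cons, ih, List.countP_cons, PySem.Dict.getD_insert]
    by_cases h : c = key j
    · subst h
      rw [if_pos rfl]
      simp
      push_cast
      ring
    · have hb : (key j == c) = false := by
        simp only [beq_eq_false_iff_ne]
        exact fun hh => h hh.symm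
      rw [if_neg h, hb]
      push_cast
      ring

-- the counts dict holds, per color, the number of available (non-red) ref slots
lemma pv_counts0 (ref test : List String) (c : String) :
    (pvC0 ref test).getD c 0 = (pvAvail ref (pvR ref test) c : Int) := by
  unfold pvC0 pvAvail
  have hstep : (fun (d : PySem.Dict String Int) (j : Nat) =>
        if ref.getD j "" ≠ test.getD j "" then
          d.insert (ref.getD j "") (d.getD (ref.getD j "") 0 + 1) else d)
      = (fun d j => if (!(pvRed ref test j)) = true then
          d.insert (ref.getD j "") (d.getD (ref.getD j "") 0 + 1) else d) := by
    funext d j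
    by_cases h : ref.getD j "" = test.getD j "" <;> simp [pvRed, h]
  rw [hstep, ← List.foldl_filter]
  rw [pv_getD_foldl_insert_key (fun j => ref.getD j "")]
  rw [PySem.Dict.getD_empty, List.countP_filter, zero_add]
  rw [List.countP_eq_length_filter]
  congr 2
  apply List.filter_congr
  intro i hi
  have hmem : List.elem i (pvR ref test) = pvRed ref test i := by
    by_cases h : pvRed ref test i
    · simp [pvR, List.mem_filter, hi, h]
    · simp [pvR, List.mem_filter, h]
  rw [hmem]
  cases pvRed ref test i <;> cases (ref.getD i "" == c) <;> rfl

-- consuming one available slot of color t decrements exactly that count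
lemma pv_avail_snoc (ref : List String) (acr : List Nat) (i0 : Nat) (hi0n : i0 < ref.length)
    (hi0 : i0 ∉ acr) (c : String) :
    pvAvail ref (acr ++ [i0]) c =
      if c = ref.getD i0 "" then pvAvail ref acr c - 1 else pvAvail ref acr c := by
  unfold pvAvail
  have hcond : ∀ i, (!(List.elem i (acr ++ [i0])) && (ref.getD i "" == c))
      = ((!(List.elem i acr) && (ref.getD i "" == c)) && !(i == i0)) := by
    intro i
    by_cases h1 : i ∈ acr <;> by_cases h2 : i = i0 <;>
      simp [h1, h2] <;> cases (ref.getD i "" == c) <;> simp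
  rw [List.filter_congr (fun i _ => hcond i)]
  by_cases hc : c = ref.getD i0 ""
  · rw [if_pos hc]
    have hp : (!(List.elem i0 acr) && (ref.getD i0 "" == c)) = true := by
      simp [hi0, hc]
    have := pv_length_filter_excl (fun i => !(List.elem i acr) && (ref.getD i "" == c)) i0
      (List.range ref.length) (List.nodup_range) (by simp [hi0n]) hp
    simp only [] at this
    omega
  · rw [if_neg hc]
    congr 1
    apply List.filter_congr
    intro i _
    by_cases h2 : i = i0
    · subst h2
      have : (ref.getD i "" == c) = false := by
        simp only [beq_eq_false_iff_ne]
        exact fun h => hc h.symm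
      rw [this]
      simp
    · simp [h2]

lemma pv_avail_pos_iff (ref : List String) (acr : List Nat) (c : String) :
    0 < pvAvail ref acr c ↔ ∃ i, i < ref.length ∧ ref.getD i "" = c ∧ i ∉ acr := by
  unfold pvAvail
  constructor
  · intro h
    obtain ⟨x, hx⟩ := List.exists_mem_of_length_pos h
    rw [List.mem_filter] at hx
    obtain ⟨hxr, hxc⟩ := hx
    simp at hxr hxc
    exact ⟨x, hxr, hxc.2, hxc.1⟩
  · rintro ⟨i, h1, h2, h3⟩
    exact List.length_pos_of_mem (List.mem_filter.mpr ⟨List.mem_range.mpr h1, by simp [h3]; exact h2⟩)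

lemma pvA_succ (ref test : List String) (k : Nat) :
    pvA ref test (k + 1) = pvStA ref test (pvA ref test k) k := by
  simp [pvA, List.range_succ]

lemma pvB_succ (ref test : List String) (k : Nat) :
    pvB ref test (k + 1) = pvStB (pvB ref test k) (ref.getD k "", test.getD k "") := by
  simp [pvB, List.range_succ]

-- the main joint invariant of A's white phase and B's single pass ------------
lemma pv_phase2 (ref test : List String) (hlen : ref.length = test.length) :
    ∀ (k : Nat), k ≤ ref.length →
    (pvA ref test k).1.length = ref.length
    ∧ (∀ m, k ≤ m → m < ref.length →
        (pvA ref test k).1.getD m "" = (if pvRed ref test m then "red" else "empty"))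
    ∧ (pvB ref test k).2.length = k
    ∧ (∀ m, m < k → (pvA ref test k).1.getD m "" = (pvB ref test k).2.getD m "")
    ∧ (∀ c, (pvB ref test k).1.getD c 0 = (pvAvail ref (pvA ref test k).2.1 c : Int))
    ∧ (∀ i, i < ref.length → pvRed ref test i → i ∈ (pvA ref test k).2.1)
    ∧ (∀ m ∈ (pvA ref test k).2.2, pvRed ref test m = true ∨ m < k) := by
  intro k
  induction k with
  | zero =>
    intro _
    refine ⟨by simp [pvA, pvRes0], ?_, by simp [pvB], ?_, ?_, ?_, ?_⟩
    · intro m _ hm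
      simp only [pvA, List.range_zero, List.foldl_nil, pvRes0]
      rw [PySem.List.getD_map_range _ _ _ _ hm]
    · intro m hm
      exact absurd hm (Nat.not_lt_zero m)
    · intro c
      simpa [pvA, pvB] using pv_counts0 ref test c
    · intro i hi hred
      simp only [pvA, List.range_zero, List.foldl_nil, pvR]
      rw [List.mem_filter]
      exact ⟨List.mem_range.mpr hi, hred⟩
    · intro m hm
      left
      simp only [pvA, List.range_zero, List.foldl_nil, pvR, List.mem_filter] at hm
      exact hm.2
  | succ k ih =>
    intro hk1
    obtain ⟨i1, i2, i3, i4, i5, i6, i7⟩ := ih (by omega)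
    have hkn : k < ref.length := by omega
    rw [pvA_succ, pvB_succ]
    by_cases hred : pvRed ref test k = true
    · -- red position: A skips it, B appends 'red'
      have hA1 : (pvA ref test k).1.getD k "" = "red" := by
        rw [i2 k (le_refl k) hkn, if_pos hred]
      have heq : ref.getD k "" = test.getD k "" := by simpa [pvRed] using hred
      have hstA : pvStA ref test (pvA ref test k) k = pvA ref test k := by
        unfold pvStA
        rw [hA1]
        simp
      have hstB : pvStB (pvB ref test k) (ref.getD k "", test.getD k "")
          = ((pvB ref test k).1, (pvB ref test k).2 ++ ["red"]) := by
        unfold pvStB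
        rw [if_pos heq]
      rw [hstA, hstB]
      refine ⟨i1, ?_, by simp [i3], ?_, i5, i6, ?_⟩
      · intro m hm1 hm2
        exact i2 m (by omega) hm2
      · intro m hm
        by_cases hmk : m = k
        · subst hmk
          rw [hA1, pv_getD_append_at _ _ _ _ i3]
        · have hmk' : m < k := by omega
          rw [pv_getD_append_left _ _ _ _ (by omega)]
          exact i4 m hmk'
      · intro m hm
        rcases i7 m hm with h | h
        · exact Or.inl h
        · exact Or.inr (by omega)
    · -- non-red position
      have hA1 : (pvA ref test k).1.getD k "" = "empty" := by
        rw [i2 k (le_refl k) hkn, if_neg hred]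
      have hkact : k ∉ (pvA ref test k).2.2 := by
        intro hmem
        rcases i7 k hmem with h | h
        · exact hred h
        · omega
      have hne : ¬ (ref.getD k "" = test.getD k "") := by simpa [pvRed] using hred
      have hinner := pegsInner_spec ref test k (List.range ref.length)
        (pvA ref test k).1 (pvA ref test k).2.1 (pvA ref test k).2.2
      by_cases hpos : 0 < pvAvail ref (pvA ref test k).2.1 (test.getD k "")
      · -- a matching unconsumed ref slot exists: A finds one, B decrements the count
        obtain ⟨iw, hw1, hw2, hw3⟩ := (pv_avail_pos_iff ref _ _).mp hpos
        have hsome : (List.find? (fun i => decide (ref.getD i "" = test.getD k ""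
            ∧ i ∉ (pvA ref test k).2.1 ∧ k ∉ (pvA ref test k).2.2))
            (List.range ref.length)).isSome := by
          rw [List.find?_isSome]
          exact ⟨iw, List.mem_range.mpr hw1, decide_eq_true ⟨hw2, hw3, hkact⟩⟩
        obtain ⟨i0, hfind⟩ := Option.isSome_iff_exists.mp hsome
        have hp0 : ref.getD i0 "" = test.getD k "" ∧ i0 ∉ (pvA ref test k).2.1
            ∧ k ∉ (pvA ref test k).2.2 := by
          have := List.find?_some hfind
          simpa using this
        have hmem0 : i0 < ref.length := List.mem_range.mp (List.mem_of_find?_eq_some hfind)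
        have hstA : pvStA ref test (pvA ref test k) k
            = ((pvA ref test k).1.set k "white", (pvA ref test k).2.1 ++ [i0],
               (pvA ref test k).2.2 ++ [k]) := by
          unfold pvStA
          rw [if_pos hA1, hinner, hfind]
        have hBpos : (pvB ref test k).1.getD (test.getD k "") 0 > 0 := by
          rw [i5]
          exact_mod_cast hpos
        have hstB : pvStB (pvB ref test k) (ref.getD k "", test.getD k "")
            = ((pvB ref test k).1.insert (test.getD k "")
                 ((pvB ref test k).1.getD (test.getD k "") 0 - 1),
               (pvB ref test k).2 ++ ["white"]) := by
          unfold pvStB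
          rw [if_neg hne, if_pos hBpos]
        rw [hstA, hstB]
        refine ⟨by simp [i1], ?_, by simp [i3], ?_, ?_, ?_, ?_⟩
        · intro m hm1 hm2
          rw [pv_getD_set_ne _ _ _ _ _ (by omega)]
          exact i2 m (by omega) hm2
        · intro m hm
          by_cases hmk : m = k
          · subst hmk
            rw [pv_getD_set_self _ _ _ _ (by omega), pv_getD_append_at _ _ _ _ i3]
          · have hmk' : m < k := by omega
            rw [pv_getD_set_ne _ _ _ _ _ hmk, pv_getD_append_left _ _ _ _ (by omega)]
            exact i4 m hmk'
        · intro c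
          rw [PySem.Dict.getD_insert,
            pv_avail_snoc ref _ i0 hmem0 hp0.2.1 c, hp0.1]
          by_cases hc : c = test.getD k ""
          · rw [if_pos hc, if_pos hc, i5, hc]
            have := hpos
            omega
          · rw [if_neg hc, if_neg hc, i5]
        · intro i hi hr
          exact List.mem_append_left _ (i6 i hi hr)
        · intro m hm
          rcases List.mem_append.mp hm with h | h
          · rcases i7 m h with h' | h'
            · exact Or.inl h'
            · exact Or.inr (by omega)
          · simp at h
            exact Or.inr (by omega)
      · -- no slot of this color left: A finds nothing, B appends 'empty'
        have hav0 : pvAvail ref (pvA ref test k).2.1 (test.getD k "") = 0 := by omega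
        have hnone : (List.find? (fun i => decide (ref.getD i "" = test.getD k ""
            ∧ i ∉ (pvA ref test k).2.1 ∧ k ∉ (pvA ref test k).2.2))
            (List.range ref.length)) = none := by
          rw [List.find?_eq_none]
          intro x hx hdec
          have hp := of_decide_eq_true hdec
          exact hpos ((pv_avail_pos_iff ref _ _).mpr
            ⟨x, List.mem_range.mp hx, hp.1, hp.2.1⟩)
        have hstA : pvStA ref test (pvA ref test k) k = pvA ref test k := by
          unfold pvStA
          rw [if_pos hA1, hinner, hnone]
        have hB0 : ¬ ((pvB ref test k).1.getD (test.getD k "") 0 > 0) := by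
          rw [i5, hav0]
          simp
        have hstB : pvStB (pvB ref test k) (ref.getD k "", test.getD k "")
            = ((pvB ref test k).1, (pvB ref test k).2 ++ ["empty"]) := by
          unfold pvStB
          rw [if_neg hne, if_neg hB0]
        rw [hstA, hstB]
        refine ⟨i1, ?_, by simp [i3], ?_, i5, i6, ?_⟩
        · intro m hm1 hm2
          exact i2 m (by omega) hm2
        · intro m hm
          by_cases hmk : m = k
          · subst hmk
            rw [hA1, pv_getD_append_at _ _ _ _ i3]
          · have hmk' : m < k := by omega
            rw [pv_getD_append_left _ _ _ _ (by omega)]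
            exact i4 m hmk'
        · intro m hm
          rcases i7 m hm with h | h
          · exact Or.inl h
          · exact Or.inr (by omega)

-- bridge the two ports to pvA / pvB ------------------------------------------
lemma pv_pegs_eq (ref test : List String) (hlen : ref.length = test.length) :
    pegs ref test = PySem.Str.join " " (pvA ref test ref.length).1 := by
  simp only [pegs, if_pos hlen]
  rw [pv_phase1_final]
  rfl

lemma pv_pegs_alt_eq (ref test : List String) (hlen : ref.length = test.length) :
    pegs_alt ref test = PySem.Str.join " " (pvB ref test ref.length).2 := by
  simp only [pegs_alt, if_pos hlen]
  rw [pv_zip_eq_map_range ref test hlen, List.foldl_map, List.foldl_map]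
  rfl

lemma pv_final (ref test : List String) (hlen : ref.length = test.length) :
    (pvA ref test ref.length).1 = (pvB ref test ref.length).2 := by
  obtain ⟨h1, _, h3, h4, _⟩ := pv_phase2 ref test hlen ref.length (le_refl _)
  apply List.ext_getElem
  · omega
  · intro m hm1 hm2
    have := h4 m (by omega)
    rwa [List.getD_eq_getElem _ _ (by omega), List.getD_eq_getElem _ _ (by omega)] at this

-- ===== VERDICT (by name: the statement is the Claim_ definition above) =====
theorem pegs_spec : Claim_equal_pegs := by
  intro ref test _ hpre
  unfold Spec_pegs
  rw [pv_pegs_eq ref test hpre, pv_pegs_alt_eq ref test hpre, pv_final ref test hpre]
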